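-- pv_equiv track=rewrite | github.com/cymis/adagio-cli | src/adagio/type_format.py | _wrap_choice_label
-- ===== SOURCE A (Python) =====
-- def _wrap_choice_label(label: str, width: int) -> list[str]:
--     choices = [choice for choice in label[1:-1].split("|") if choice]
--     if not choices:
--         return [label]
--
--     lines: list[str] = []
--     current = "["
--
--     for index, choice in enumerate(choices):
--         is_last = index == len(choices) - 1
--         separator = "" if current in ("[", " |") else "|"
--         suffix = "]" if is_last else ""
--         candidate = current + separator + choice + suffix
--
--         if len(candidate) <= width or current in ("[", " |"):
--             current = candidate
--         else:
--             lines.append(current)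
--             current = " |" + choice + suffix
--
--     if not current.endswith("]"):
--         current += "]"
--     lines.append(current)
--     return lines
-- ===== SOURCE B (Python) =====
-- def _wrap_choice_label(label: str, width: int) -> list[str]:
--     choices = [c for c in label[1:-1].split("|") if c]
--     if not choices:
--         return [label]
--
--     # Pass 1: group the choices greedily by rendered width.
--     n = len(choices)
--     done: list[list[str]] = []      # completed groups
--     cur = [choices[0]]              # current group (first choice always accepted)
--     used = 1 + len(choices[0]) + (1 if n == 1 else 0)
--     for i in range(1, n):
--         choice = choices[i]
--         extra = 1 + len(choice) + (1 if i == n - 1 else 0)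
--         if used + extra <= width:
--             cur.append(choice)
--             used += extra
--         else:
--             done.append(cur)
--             cur = [choice]
--             used = 2 + len(choice) + (1 if i == n - 1 else 0)
--     groups = done + [cur]
--
--     # Pass 2: render the groups.
--     lines = ["[" + "|".join(groups[0])]
--     for g in groups[1:]:
--         lines.append(" |" + "|".join(g))
--     lines[-1] += "]"
--     return lines
-- ===== Notes on version B (the rewrite author's own statement) =====
-- stated objective: alternative
-- what changed: A builds the wrapped lines character-incrementally with a sentinel-state 'current' string and in-loop separator/suffix logic; B first greedily groups the choices into lists tracking only rendered widths, then renders each group with a '|'-join plus '['/' |' prefixes and a final ']' in a second pass.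
import Mathlib
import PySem

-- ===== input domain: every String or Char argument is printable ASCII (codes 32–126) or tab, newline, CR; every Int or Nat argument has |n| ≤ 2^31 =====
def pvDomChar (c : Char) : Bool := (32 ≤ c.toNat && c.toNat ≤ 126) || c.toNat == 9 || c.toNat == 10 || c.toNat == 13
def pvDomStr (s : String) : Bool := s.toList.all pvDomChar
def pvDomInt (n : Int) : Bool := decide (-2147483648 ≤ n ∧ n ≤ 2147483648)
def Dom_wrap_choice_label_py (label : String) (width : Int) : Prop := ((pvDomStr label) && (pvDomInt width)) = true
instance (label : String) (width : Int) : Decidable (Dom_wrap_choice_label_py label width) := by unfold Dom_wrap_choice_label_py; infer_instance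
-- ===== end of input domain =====

-- B replaces A's sentinel-state incremental string builder by a grouping pass (greedy lists of
-- choices) followed by a separate join-based rendering pass; same cost, different decomposition.

-- ===== PORT A =====
-- shared first line of both Pythons: [choice for choice in label[1:-1].split("|") if choice]
def wclChoices (label : String) : List (List Char) :=
  (PySem.Chars.splitOn (PySem.List.slice label.toList (some 1) (some (-1))) ['|']).filter
    (fun c => decide (c ≠ []))

-- the body of A's 'for index, choice in enumerate(choices)' loop, state (lines, current)
def wclStepA (width n : Int) (st : List (List Char) × List Char) (p : Int × List Char) :
    List (List Char) × List Char :=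
  let is_last := p.1 = n - 1
  let sep : List Char := if st.2 = ['['] ∨ st.2 = [' ', '|'] then [] else ['|']
  let suffix : List Char := if is_last then [']'] else []
  let candidate := st.2 ++ sep ++ p.2 ++ suffix
  if PySem.List.len candidate ≤ width ∨ st.2 = ['['] ∨ st.2 = [' ', '|'] then (st.1, candidate)
  else (st.1 ++ [st.2], [' ', '|'] ++ p.2 ++ suffix)

def wrap_choice_label_py (label : String) (width : Int) : List String :=
  let choices := wclChoices label
  if choices = [] then [label]
  else
    let st := (PySem.List.enumerate choices).foldl
      (wclStepA width (PySem.List.len choices)) ([], ['['])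
    let current := if PySem.Chars.endswith st.2 [']'] then st.2 else st.2 ++ [']']
    (st.1 ++ [current]).map (fun cs => String.ofList cs)

-- ===== PORT B =====
-- the body of B's 'for i in range(1, n)' loop, state (done, cur, used)
def wclStepB (width n : Int) (choices : List (List Char))
    (st : List (List (List Char)) × List (List Char) × Int) (i : Int) :
    List (List (List Char)) × List (List Char) × Int :=
  let choice := PySem.List.pyGetD choices i []
  let extra := 1 + PySem.List.len choice + (if i = n - 1 then (1 : Int) else 0)
  if st.2.2 + extra ≤ width then (st.1, st.2.1 ++ [choice], st.2.2 + extra)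
  else (st.1 ++ [st.2.1], [choice], 2 + PySem.List.len choice + (if i = n - 1 then (1 : Int) else 0))

def wrap_choice_label_py_alt (label : String) (width : Int) : List String :=
  let choices := wclChoices label
  if choices = [] then [label]
  else
    let n := PySem.List.len choices
    let c0 := PySem.List.pyGetD choices 0 []
    -- pass 1: group the choices greedily
    let st := (PySem.List.pyRange 1 n).foldl (wclStepB width n choices)
      ([], [c0], 1 + PySem.List.len c0 + (if n = 1 then (1 : Int) else 0))
    let groups := st.1 ++ [st.2.1]
    -- pass 2: render the groups
    let lines0 := [['['] ++ PySem.Chars.join ['|'] (PySem.List.pyGetD groups 0 [])]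
    let lines := (PySem.List.slice groups (some 1)).foldl
      (fun ls g => ls ++ [[' ', '|'] ++ PySem.Chars.join ['|'] g]) lines0
    let lines' := PySem.List.slice lines none (some (-1)) ++
      [PySem.List.pyGetD lines (-1) [] ++ [']']]
    lines'.map (fun cs => String.ofList cs)

-- ===== PRECONDITION & SPEC =====
def Spec_wrap_choice_label_py (label : String) (width : Int) (out : List String) : Prop := out = wrap_choice_label_py_alt label width
instance (label : String) (width : Int) (out : List String) : Decidable (Spec_wrap_choice_label_py label width out) := by unfold Spec_wrap_choice_label_py; infer_instance

-- ===== CLAIM (what is proved, stated in full; the proofs are below) =====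
def Claim_equal_wrap_choice_label_py : Prop := ∀ (label : String) (width : Int), Dom_wrap_choice_label_py label width → Spec_wrap_choice_label_py label width (wrap_choice_label_py label width)

-- ===== LEMMAS AND PROOFS =====

-- B's loop body with the choice passed alongside its index (pyGetD resolved)
def wclStepB' (width n : Int) (st : List (List (List Char)) × List (List Char) × Int)
    (p : Int × List Char) : List (List (List Char)) × List (List Char) × Int :=
  let extra := 1 + PySem.List.len p.2 + (if p.1 = n - 1 then (1 : Int) else 0)
  if st.2.2 + extra ≤ width then (st.1, st.2.1 ++ [p.2], st.2.2 + extra)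
  else (st.1 ++ [st.2.1], [p.2], 2 + PySem.List.len p.2 + (if p.1 = n - 1 then (1 : Int) else 0))

-- render a list of groups the way B's second pass does (without the final ']')
def wclRender : List (List (List Char)) → List (List Char)
  | [] => []
  | g :: gs => (['['] ++ PySem.Chars.join ['|'] g) ::
      gs.map (fun g => [' ', '|'] ++ PySem.Chars.join ['|'] g)

-- append ']' to the last line
def wclFin : List (List Char) → List (List Char)
  | [] => []
  | [x] => [x ++ [']']]
  | x :: y :: xs => x :: wclFin (y :: xs)

def wclPrefix (done : List (List (List Char))) : List Char :=
  if done = [] then ['['] else [' ', '|']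

theorem wclRender_append (gs : List (List (List Char))) (g : List (List Char)) :
    wclRender (gs ++ [g]) = wclRender gs ++ [wclPrefix gs ++ PySem.Chars.join ['|'] g] := by
  cases gs with
  | nil => simp [wclRender, wclPrefix]
  | cons a as => simp [wclRender, wclPrefix]

theorem wclFin_append (xs : List (List Char)) (x : List Char) :
    wclFin (xs ++ [x]) = xs ++ [x ++ [']']] := by
  induction xs with
  | nil => simp [wclFin]
  | cons a as ih =>
    cases as with
    | nil => simp [wclFin]
    | cons b bs => simpa [wclFin] using ih

theorem wclJoin_cons (x : List Char) (xs : List (List Char)) (h : xs ≠ []) :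
    PySem.Chars.join ['|'] (x :: xs) = x ++ '|' :: PySem.Chars.join ['|'] xs := by
  cases xs with
  | nil => exact absurd rfl h
  | cons y ys => simp [PySem.Chars.join_cons_cons]

theorem wclJoin_ne_nil (cur : List (List Char)) (h : cur ≠ [])
    (hmem : ∀ c ∈ cur, c ≠ []) : PySem.Chars.join ['|'] cur ≠ [] := by
  cases cur with
  | nil => exact absurd rfl h
  | cons c cs =>
    cases cs with
    | nil =>
      simpa [PySem.Chars.join_singleton] using hmem c (by simp)
    | cons d ds =>
      rw [wclJoin_cons c (d :: ds) (by simp)]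
      have : c ≠ [] := hmem c (by simp)
      intro hcontra
      rcases List.append_eq_nil_iff.mp hcontra with ⟨h1, h2⟩
      exact this h1

theorem wclJoin_append (cur : List (List Char)) (x : List Char) (h : cur ≠ []) :
    PySem.Chars.join ['|'] (cur ++ [x]) = PySem.Chars.join ['|'] cur ++ '|' :: x := by
  induction cur with
  | nil => exact absurd rfl h
  | cons c cs ih =>
    cases cs with
    | nil => simp [PySem.Chars.join_singleton, wclJoin_cons]
    | cons d ds =>
      rw [List.cons_append, wclJoin_cons c ((d :: ds) ++ [x]) (by simp),
        wclJoin_cons c (d :: ds) (by simp), ih (by simp)]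
      simp

theorem wclCurrent_ne (done : List (List (List Char))) (cur : List (List Char))
    (h : cur ≠ []) (hmem : ∀ c ∈ cur, c ≠ []) :
    ¬ (wclPrefix done ++ PySem.Chars.join ['|'] cur = ['['] ∨
       wclPrefix done ++ PySem.Chars.join ['|'] cur = [' ', '|']) := by
  have hj := wclJoin_ne_nil cur h hmem
  rcases List.exists_cons_of_ne_nil hj with ⟨a, as, ha⟩
  unfold wclPrefix
  split_ifs with hd
  · rintro (h1 | h1) <;> rw [ha] at h1 <;> simp at h1
  · rintro (h1 | h1) <;> rw [ha] at h1 <;> simp at h1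

theorem wclEndswith (cs : List Char) : PySem.Chars.endswith (cs ++ [']']) [']'] = true := by
  simp [PySem.Chars.endswith, List.isSuffixOf_iff_suffix]

theorem wclPyRange_nil (a b : Int) (h : b ≤ a) : PySem.List.pyRange a b = [] := by
  simp [PySem.List.pyRange]
  intro h'
  omega

-- 'for i in range(k, len(xs)): body(i, xs[i])' as a fold over enumerate(xs[k:], k)
theorem wclFoldl_pyRange_enumerate {α β : Type} (xs : List β) (d : β) (g : α → Int → β → α)
    (m : Nat) :
    ∀ (k : Nat) (init : α), xs.length - k = m → k ≤ xs.length →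
      (PySem.List.pyRange (k : Int) (PySem.List.len xs)).foldl
          (fun st j => g st j (PySem.List.pyGetD xs j d)) init
        = (PySem.List.enumerate (xs.drop k) (k : Int)).foldl (fun st p => g st p.1 p.2) init := by
  induction m with
  | zero =>
    intro k init hm hk
    have hkl : k = xs.length := by omega
    rw [PySem.List.len_eq, wclPyRange_nil _ _ (by omega), List.drop_of_length_le (by omega)]
    simp [PySem.List.enumerate_nil]
  | succ m ih =>
    intro k init hm hk
    have hlt : k < xs.length := by omega
    rw [PySem.List.len_eq, PySem.List.pyRange_one_cons (by exact_mod_cast hlt)]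
    rw [List.drop_eq_getElem_cons hlt, PySem.List.enumerate_cons]
    rw [List.foldl_cons, List.foldl_cons]
    have hget : PySem.List.pyGetD xs (k : Int) d = xs[k] := by
      rw [PySem.List.pyGetD_natCast, List.getD_eq_getElem _ _ hlt]
    rw [hget]
    have hcast : ((k : Int) + 1) = ((k + 1 : Nat) : Int) := by push_cast; ring
    rw [hcast, ← PySem.List.len_eq]
    exact ih (k + 1) _ (by omega) (by omega)

-- core correspondence: A's remaining loop vs B's remaining loop + final rendering
theorem wclCore (width n : Int) :
    ∀ (l : List (List Char)) (s : Int) (done : List (List (List Char)))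
      (cur : List (List Char)),
      l ≠ [] → (∀ c ∈ l, c ≠ []) → cur ≠ [] → (∀ c ∈ cur, c ≠ []) →
      s + l.length = n →
      (let stA := (PySem.List.enumerate l s).foldl (wclStepA width n)
          (wclRender done, wclPrefix done ++ PySem.Chars.join ['|'] cur);
       let stB := (PySem.List.enumerate l s).foldl (wclStepB' width n) (done, cur,
            ((wclPrefix done ++ PySem.Chars.join ['|'] cur).length : Int));
       stA.1 ++ [if PySem.Chars.endswith stA.2 [']'] then stA.2 else stA.2 ++ [']']]
         = wclFin (wclRender (stB.1 ++ [stB.2.1]))) := by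
  intro l
  induction l with
  | nil => intro s done cur hne; exact absurd rfl hne
  | cons x l' ih =>
    intro s done cur _ hlmem hcur hcurmem hs
    have hx : x ≠ [] := hlmem x (by simp)
    have hA := wclCurrent_ne done cur hcur hcurmem
    have hsep : (if wclPrefix done ++ PySem.Chars.join ['|'] cur = ['['] ∨
        wclPrefix done ++ PySem.Chars.join ['|'] cur = [' ', '|'] then ([] : List Char)
        else ['|']) = ['|'] := if_neg hA
    simp only [List.length_cons] at hs
    cases l' with
    | nil =>
      -- x is the last choice (index s = n - 1)
      have hlast : s = n - 1 := by simp at hs; omega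
      simp only [PySem.List.enumerate_cons, PySem.List.enumerate_nil, List.foldl_cons,
        List.foldl_nil]
      by_cases hb : ((wclPrefix done ++ PySem.Chars.join ['|'] cur).length : Int) +
          (1 + PySem.List.len x + 1) ≤ width
      · -- accepted
        have hcond : PySem.List.len
            (wclPrefix done ++ PySem.Chars.join ['|'] cur ++ ['|'] ++ x ++ [']']) ≤ width ∨
            wclPrefix done ++ PySem.Chars.join ['|'] cur = ['['] ∨
            wclPrefix done ++ PySem.Chars.join ['|'] cur = [' ', '|'] := by
          left
          rw [PySem.List.len_eq] at hb ⊢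
          simp only [List.length_append, List.length_cons, List.length_nil] at hb ⊢
          push_cast at hb ⊢
          omega
        have hA1 : wclStepA width n
            (wclRender done, wclPrefix done ++ PySem.Chars.join ['|'] cur) (s, x) =
            (wclRender done,
              wclPrefix done ++ PySem.Chars.join ['|'] cur ++ ['|'] ++ x ++ [']']) := by
          simp only [wclStepA]
          rw [hsep, if_pos hlast, if_pos hcond]
        have hB1 : wclStepB' width n
            (done, cur, ((wclPrefix done ++ PySem.Chars.join ['|'] cur).length : Int)) (s, x) =
            (done, cur ++ [x],
              ((wclPrefix done ++ PySem.Chars.join ['|'] cur).length : Int) +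
                (1 + PySem.List.len x + 1)) := by
          simp only [wclStepB']
          rw [if_pos hlast, if_pos hb]
        rw [hA1, hB1]
        have hend : PySem.Chars.endswith
            (wclPrefix done ++ PySem.Chars.join ['|'] cur ++ ['|'] ++ x ++ [']']) [']'] = true := by
          rw [show wclPrefix done ++ PySem.Chars.join ['|'] cur ++ ['|'] ++ x ++ [']'] =
            (wclPrefix done ++ PySem.Chars.join ['|'] cur ++ ['|'] ++ x) ++ [']'] by simp]
          exact wclEndswith _
        rw [if_pos hend]
        rw [wclRender_append, wclFin_append, wclJoin_append cur x hcur]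
        simp
      · -- rejected: new line
        have hcond : ¬ (PySem.List.len
            (wclPrefix done ++ PySem.Chars.join ['|'] cur ++ ['|'] ++ x ++ [']']) ≤ width ∨
            wclPrefix done ++ PySem.Chars.join ['|'] cur = ['['] ∨
            wclPrefix done ++ PySem.Chars.join ['|'] cur = [' ', '|']) := by
          rintro (h1 | h1 | h1)
          · apply hb
            rw [PySem.List.len_eq] at h1 ⊢
            simp only [List.length_append, List.length_cons, List.length_nil] at h1 ⊢
            push_cast at h1 ⊢
            omega
          · exact hA (Or.inl h1)
          · exact hA (Or.inr h1)
        have hA1 : wclStepA width n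
            (wclRender done, wclPrefix done ++ PySem.Chars.join ['|'] cur) (s, x) =
            (wclRender done ++ [wclPrefix done ++ PySem.Chars.join ['|'] cur],
              [' ', '|'] ++ x ++ [']']) := by
          simp only [wclStepA]
          rw [hsep, if_pos hlast, if_neg hcond]
        have hB1 : wclStepB' width n
            (done, cur, ((wclPrefix done ++ PySem.Chars.join ['|'] cur).length : Int)) (s, x) =
            (done ++ [cur], [x], 2 + PySem.List.len x + 1) := by
          simp only [wclStepB']
          rw [if_pos hlast, if_neg hb]
        rw [hA1, hB1]
        have hend : PySem.Chars.endswith ([' ', '|'] ++ x ++ [']']) [']'] = true := by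
          rw [show [' ', '|'] ++ x ++ [']'] = ([' ', '|'] ++ x) ++ [']'] by simp]
          exact wclEndswith _
        rw [if_pos hend]
        rw [wclRender_append (done ++ [cur]) [x], wclFin_append, wclRender_append,
          PySem.Chars.join_singleton]
        have hpre : wclPrefix (done ++ [cur]) = [' ', '|'] := by
          unfold wclPrefix; rw [if_neg (by simp)]
        rw [hpre]
    | cons y tl =>
      -- x is not the last choice
      have hnotlast : ¬ (s = n - 1) := by simp at hs; omega
      simp only [PySem.List.enumerate_cons, List.foldl_cons]
      by_cases hb : ((wclPrefix done ++ PySem.Chars.join ['|'] cur).length : Int) +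
          (1 + PySem.List.len x + 0) ≤ width
      · -- accepted into the current line / group
        have hcond : PySem.List.len
            (wclPrefix done ++ PySem.Chars.join ['|'] cur ++ ['|'] ++ x ++ []) ≤ width ∨
            wclPrefix done ++ PySem.Chars.join ['|'] cur = ['['] ∨
            wclPrefix done ++ PySem.Chars.join ['|'] cur = [' ', '|'] := by
          left
          rw [PySem.List.len_eq] at hb ⊢
          simp only [List.length_append, List.length_cons, List.length_nil] at hb ⊢
          push_cast at hb ⊢
          omega
        have hA1 : wclStepA width n
            (wclRender done, wclPrefix done ++ PySem.Chars.join ['|'] cur) (s, x) =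
            (wclRender done, wclPrefix done ++ PySem.Chars.join ['|'] (cur ++ [x])) := by
          simp only [wclStepA]
          rw [hsep, if_neg hnotlast, if_pos hcond, wclJoin_append cur x hcur]
          simp
        have hB1 : wclStepB' width n
            (done, cur, ((wclPrefix done ++ PySem.Chars.join ['|'] cur).length : Int)) (s, x) =
            (done, cur ++ [x],
              ((wclPrefix done ++ PySem.Chars.join ['|'] (cur ++ [x])).length : Int)) := by
          simp only [wclStepB']
          rw [if_neg hnotlast, if_pos (by simpa using hb)]
          rw [wclJoin_append cur x hcur, PySem.List.len_eq]
          simp only [List.length_append, List.length_cons]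
          push_cast
          refine congrArg (fun z => (done, cur ++ [x], z)) ?_
          omega
        rw [hA1, hB1]
        have hmem' : ∀ c ∈ cur ++ [x], c ≠ [] := by
          intro c hc
          rcases List.mem_append.mp hc with h1 | h1
          · exact hcurmem c h1
          · simp at h1; subst h1; exact hx
        exact ih (s + 1) done (cur ++ [x]) (by simp)
          (fun c hc => hlmem c (List.mem_cons_of_mem _ hc)) (by simp) hmem'
          (by simp only [List.length_cons] at *; omega)
      · -- start a new line / group
        have hcond : ¬ (PySem.List.len
            (wclPrefix done ++ PySem.Chars.join ['|'] cur ++ ['|'] ++ x ++ []) ≤ width ∨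
            wclPrefix done ++ PySem.Chars.join ['|'] cur = ['['] ∨
            wclPrefix done ++ PySem.Chars.join ['|'] cur = [' ', '|']) := by
          rintro (h1 | h1 | h1)
          · apply hb
            rw [PySem.List.len_eq] at h1 ⊢
            simp only [List.length_append, List.length_cons] at h1 ⊢
            push_cast at h1 ⊢
            omega
          · exact hA (Or.inl h1)
          · exact hA (Or.inr h1)
        have hpre : wclPrefix (done ++ [cur]) = [' ', '|'] := by
          unfold wclPrefix; rw [if_neg (by simp)]
        have hA1 : wclStepA width n
            (wclRender done, wclPrefix done ++ PySem.Chars.join ['|'] cur) (s, x) =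
            (wclRender (done ++ [cur]),
              wclPrefix (done ++ [cur]) ++ PySem.Chars.join ['|'] [x]) := by
          simp only [wclStepA]
          rw [hsep, if_neg hnotlast, if_neg hcond, wclRender_append, hpre,
            PySem.Chars.join_singleton]
          simp
        have hB1 : wclStepB' width n
            (done, cur, ((wclPrefix done ++ PySem.Chars.join ['|'] cur).length : Int)) (s, x) =
            (done ++ [cur], [x],
              ((wclPrefix (done ++ [cur]) ++ PySem.Chars.join ['|'] [x]).length : Int)) := by
          simp only [wclStepB']
          rw [if_neg hnotlast, if_neg (by simpa using hb)]
          rw [hpre, PySem.Chars.join_singleton, PySem.List.len_eq]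
          simp only [List.length_append, List.length_cons, List.length_nil]
          push_cast
          refine congrArg (fun z => (done ++ [cur], [x], z)) ?_
          omega
        rw [hA1, hB1]
        have hmem' : ∀ c ∈ [x], c ≠ [] := by
          intro c hc; simp at hc; subst hc; exact hx
        exact ih (s + 1) (done ++ [cur]) [x] (by simp)
          (fun c hc => hlmem c (List.mem_cons_of_mem _ hc)) (by simp) hmem'
          (by simp only [List.length_cons] at *; omega)

-- B's rendering pipeline computes wclFin ∘ wclRender on done ++ [cur]
theorem wclFoldl_append_map {α : Type} (l : List α) (f : α → List Char)
    (init : List (List Char)) :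
    l.foldl (fun ls g => ls ++ [f g]) init = init ++ l.map f := by
  induction l generalizing init with
  | nil => simp
  | cons a as ih => simp [ih, List.foldl_cons]

theorem wclPyGetD_last (xs : List (List Char)) (x : List Char) :
    PySem.List.pyGetD (xs ++ [x]) (-1) [] = x := by
  rw [show (-1 : Int) = -((1 : Nat) : Int) from rfl,
    PySem.List.pyGetD_neg_natCast _ 1 _ (by omega) (by simp)]
  simp

theorem wclRenderPipeline (doneF : List (List (List Char))) (curF : List (List Char)) :
    PySem.List.slice ((PySem.List.slice (doneF ++ [curF]) (some 1)).foldl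
        (fun ls g => ls ++ [[' ', '|'] ++ PySem.Chars.join ['|'] g])
        [['['] ++ PySem.Chars.join ['|'] (PySem.List.pyGetD (doneF ++ [curF]) 0 [])])
        none (some (-1)) ++
      [PySem.List.pyGetD ((PySem.List.slice (doneF ++ [curF]) (some 1)).foldl
        (fun ls g => ls ++ [[' ', '|'] ++ PySem.Chars.join ['|'] g])
        [['['] ++ PySem.Chars.join ['|'] (PySem.List.pyGetD (doneF ++ [curF]) 0 [])]) (-1) []
        ++ [']']]
      = wclFin (wclRender (doneF ++ [curF])) := by
  have hlines : (PySem.List.slice (doneF ++ [curF]) (some 1)).foldl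
      (fun ls g => ls ++ [[' ', '|'] ++ PySem.Chars.join ['|'] g])
      [['['] ++ PySem.Chars.join ['|'] (PySem.List.pyGetD (doneF ++ [curF]) 0 [])]
      = wclRender (doneF ++ [curF]) := by
    cases doneF with
    | nil =>
      rw [show (0 : Int) = ((0 : Nat) : Int) from rfl, PySem.List.pyGetD_natCast,
        show (1 : Int) = ((1 : Nat) : Int) from rfl, PySem.List.slice_from_natCast]
      simp [wclRender]
    | cons g0 gs =>
      rw [show (0 : Int) = ((0 : Nat) : Int) from rfl, PySem.List.pyGetD_natCast,
        show (1 : Int) = ((1 : Nat) : Int) from rfl, PySem.List.slice_from_natCast]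
      rw [show ((g0 :: gs) ++ [curF]) = g0 :: (gs ++ [curF]) from rfl]
      simp only [List.getD_cons_zero, List.drop_succ_cons, List.drop_zero]
      rw [wclFoldl_append_map]
      rfl
  rw [hlines, wclRender_append doneF curF, PySem.List.slice_to_neg_one,
    List.dropLast_concat, wclPyGetD_last, wclFin_append]

-- ===== VERDICT (by name: the statement is the Claim_ definition above) =====
theorem wrap_choice_label_py_spec : Claim_equal_wrap_choice_label_py := by
  unfold Claim_equal_wrap_choice_label_py Spec_wrap_choice_label_py
  intro label width _
  have hmemall : ∀ c ∈ wclChoices label, c ≠ [] := by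
    intro c hcm
    unfold wclChoices at hcm
    simpa using (List.mem_filter.mp hcm).2
  unfold wrap_choice_label_py wrap_choice_label_py_alt
  cases hc : wclChoices label with
  | nil => simp
  | cons c0 rest =>
    rw [hc] at hmemall
    have hc0 : c0 ≠ [] := hmemall c0 (by simp)
    have hne : (c0 :: rest : List (List Char)) ≠ [] := by simp
    dsimp only
    rw [if_neg hne, if_neg hne]
    have hget0 : PySem.List.pyGetD (c0 :: rest) 0 [] = c0 := by
      rw [show (0 : Int) = ((0 : Nat) : Int) from rfl, PySem.List.pyGetD_natCast]
      rfl
    cases rest with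
    | nil =>
      -- a single choice
      have hrange : PySem.List.pyRange 1 (PySem.List.len [c0]) = [] :=
        wclPyRange_nil _ _ (by rw [PySem.List.len_eq]; simp)
      have hend : PySem.Chars.endswith ('[' :: (c0 ++ [']'])) [']'] = true := by
        simpa using wclEndswith ('[' :: c0)
      simp only [hrange, hget0, PySem.List.enumerate_cons, PySem.List.enumerate_nil,
        List.foldl_cons, List.foldl_nil]
      rw [wclRenderPipeline [] [c0]]
      simp [wclStepA, PySem.List.len_eq, hend, wclRender, wclFin,
        PySem.Chars.join_singleton]
    | cons r rs =>
      -- at least two choices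
      have hlen2 : 2 ≤ (c0 :: r :: rs).length := by simp
      have hn1 : ¬ (PySem.List.len (c0 :: r :: rs) = 1) := by
        simp only [PySem.List.len_eq, List.length_cons]; push_cast; omega
      have hnot0last : ¬ ((0 : Int) = PySem.List.len (c0 :: r :: rs) - 1) := by
        simp only [PySem.List.len_eq, List.length_cons]; push_cast; omega
      -- A's first iteration consumes c0 unconditionally
      have hA1 : wclStepA width (PySem.List.len (c0 :: r :: rs)) ([], ['[']) (0, c0) =
          ([], ['['] ++ c0) := by
        simp [wclStepA]
        omega
      -- B's loop as a fold over enumerate of the remaining choices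
      have hBfun : wclStepB width (PySem.List.len (c0 :: r :: rs)) (c0 :: r :: rs) =
          fun st j => (fun st (j : Int) (c : List Char) =>
            wclStepB' width (PySem.List.len (c0 :: r :: rs)) st (j, c)) st j
            (PySem.List.pyGetD (c0 :: r :: rs) j []) := by
        funext st j
        rfl
      have hglue := wclFoldl_pyRange_enumerate (c0 :: r :: rs) ([] : List Char)
        (fun st (j : Int) (c : List Char) =>
          wclStepB' width (PySem.List.len (c0 :: r :: rs)) st (j, c))
        ((c0 :: r :: rs).length - 1) 1
        (([], [c0], 1 + PySem.List.len c0 + 0) :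
          List (List (List Char)) × List (List Char) × Int)
        rfl (by omega)
      have heta : (fun (st : List (List (List Char)) × List (List Char) × Int)
          (p : Int × List Char) =>
            wclStepB' width (PySem.List.len (c0 :: r :: rs)) st (p.1, p.2)) =
          wclStepB' width (PySem.List.len (c0 :: r :: rs)) := by
        funext st p
        rfl
      rw [heta] at hglue
      simp only [Nat.cast_one, List.drop_one, List.tail_cons] at hglue
      have hused : (1 : Int) + PySem.List.len c0 + 0 =
          ((['['] ++ c0).length : Int) := by
        simp only [PySem.List.len_eq, List.length_append, List.length_cons,
          List.length_nil]
        push_cast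
        omega
      have hcore := wclCore width (PySem.List.len (c0 :: r :: rs)) (r :: rs) 1 [] [c0]
        (by simp) (fun c hcm => hmemall c (List.mem_cons_of_mem _ hcm)) (by simp)
        (by intro c hcm; simp at hcm; subst hcm; exact hc0)
        (by simp only [PySem.List.len_eq, List.length_cons]; push_cast; omega)
      simp only [] at hcore
      have hstart : wclPrefix [] ++ PySem.Chars.join ['|'] [c0] = ['['] ++ c0 := by
        rw [PySem.Chars.join_singleton]
        simp [wclPrefix]
      rw [hstart] at hcore
      rw [show wclRender [] = [] from rfl] at hcore
      rw [show PySem.List.enumerate (c0 :: r :: rs) =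
          (0, c0) :: PySem.List.enumerate (r :: rs) 1 by
        rw [PySem.List.enumerate_cons]; norm_num]
      rw [List.foldl_cons, hA1, hget0, if_neg hn1]
      rw [hBfun, hglue, hused]
      rw [wclRenderPipeline]
      rw [hcore]
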